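-- pv_equiv track=rewrite | github.com/LouisYuHung/AI_Technology_Application_Class | self_practicing/104/problem10441.py | findans
-- ===== SOURCE A (Python) =====
-- def findans(a:list):
--   l = len(a)
--   tree0 = [a[0]]
--   tree1 = [-1, -1]
--   tree2 = [-1, -1, -1, -1]
--   tree3 = [-1, -1, -1, -1, -1, -1, -1, -1]
--   for i in range(1, l):
--     if a[i] < tree0[0] and tree1[0] == -1:
--       tree1[0] = a[i]
--     elif a[i] > tree0[0] and tree1[1] == -1:
--       tree1[1] = a[i]
--     elif a[i] < tree0[0] and a[i] < tree1[0] and tree2[0] == -1: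
--       tree2[0] = a[i]
--     elif a[i] < tree0[0] and a[i] > tree1[0] and tree2[1] == -1:
--       tree2[1] = a[i]
--     elif a[i] > tree0[0] and a[i] < tree1[1] and tree2[2] == -1:
--       tree2[2] = a[i]
--     elif a[i] > tree0[0] and a[i] > tree1[1] and tree2[3] == -1:
--       tree2[3] = a[i]
--     elif a[i] < tree0[0] and a[i] < tree1[0] and a[i] < tree2[0] and tree3[0] == -1:
--       tree3[0] = a[i]
--     elif a[i] < tree0[0] and a[i] < tree1[0] and a[i] > tree2[0] and tree3[1] == -1:
--       tree3[1] = a[i]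
--     elif a[i] < tree0[0] and a[i] > tree1[0] and a[i] < tree2[1] and tree3[2] == -1:
--       tree3[2] = a[i]
--     elif a[i] < tree0[0] and a[i] > tree1[0] and a[i] > tree2[1] and tree3[3] == -1:
--       tree3[3] = a[i]
--     elif a[i] > tree0[0] and a[i] < tree1[1] and a[i] < tree2[2] and tree3[4] == -1:
--       tree3[4] = a[i]
--     elif a[i] > tree0[0] and a[i] < tree1[1] and a[i] > tree2[2] and tree3[5] == -1:
--       tree3[5] = a[i]
--     elif a[i] > tree0[0] and a[i] > tree1[1] and a[i] < tree2[3] and tree3[6] == -1: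
--       tree3[6] = a[i]
--     elif a[i] > tree0[0] and a[i] > tree1[1] and a[i] > tree2[3] and tree3[7] == -1:
--       tree3[7] = a[i]
--
--   ans = [
--     tree3[0], tree3[1], tree2[0],
--     tree3[2], tree3[3], tree2[1], tree1[0],
--     tree3[4], tree3[5], tree2[2],
--     tree3[6], tree3[7], tree2[3], tree1[1], tree0[0]
--   ]
--   while -1 in ans:
--     ans.remove(-1)
--   return ans
-- ===== SOURCE B (Python) =====
-- def findans(a: list):
--     tree = [-1] * 15
--     tree[0] = a[0]
--
--     def place(idx, x):
--         if idx >= 15: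
--             return
--         if idx != 0 and tree[idx] == -1:
--             tree[idx] = x
--         elif x < tree[idx]:
--             place(2 * idx + 1, x)
--         elif x > tree[idx]:
--             place(2 * idx + 2, x)
--
--     for x in a[1:]:
--         place(0, x)
--
--     def post(i):
--         if i >= 15:
--             return []
--         return post(2 * i + 1) + post(2 * i + 2) + [tree[i]]
--
--     return [v for v in post(0) if v != -1]
-- ===== Notes on version B (the rewrite author's own statement) =====
-- stated objective: simpler
-- what changed: Replaces the hand-unrolled 15-branch level-by-level if/elif cascade over four separate level lists by one heap-indexed array of 15 slots with a recursive BST descent (children of i at 2i+1/2i+2) and a recursive postorder traversal, instead of a hard-coded output permutation and a while/remove loop.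
import Mathlib
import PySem

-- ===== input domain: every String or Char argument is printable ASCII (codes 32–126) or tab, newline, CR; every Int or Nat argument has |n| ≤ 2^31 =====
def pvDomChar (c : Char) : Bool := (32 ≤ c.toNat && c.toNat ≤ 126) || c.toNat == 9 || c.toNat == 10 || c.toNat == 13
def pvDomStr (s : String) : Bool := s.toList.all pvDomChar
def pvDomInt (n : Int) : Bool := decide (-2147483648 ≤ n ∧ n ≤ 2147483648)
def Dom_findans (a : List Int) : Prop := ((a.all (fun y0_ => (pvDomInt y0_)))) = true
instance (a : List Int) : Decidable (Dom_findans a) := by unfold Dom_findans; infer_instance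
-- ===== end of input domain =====

-- B uses a heap-indexed array with recursive descent/postorder instead of A's 15-branch cascade over four level lists (simpler structure, same values).

-- ===== PORT A =====
-- A's mutable state: tree1 (2 slots), tree2 (4 slots), tree3 (8 slots); tree0[0] never changes.
structure StA where
  t10 : Int
  t11 : Int
  t20 : Int
  t21 : Int
  t22 : Int
  t23 : Int
  t30 : Int
  t31 : Int
  t32 : Int
  t33 : Int
  t34 : Int
  t35 : Int
  t36 : Int
  t37 : Int
deriving Repr, DecidableEq

-- one iteration of A's for-loop body: the 15-way if/elif cascade, branches in source order
def stepA (t0 : Int) (s : StA) (x : Int) : StA :=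
  if x < t0 ∧ s.t10 = -1 then { s with t10 := x }
  else if x > t0 ∧ s.t11 = -1 then { s with t11 := x }
  else if x < t0 ∧ x < s.t10 ∧ s.t20 = -1 then { s with t20 := x }
  else if x < t0 ∧ x > s.t10 ∧ s.t21 = -1 then { s with t21 := x }
  else if x > t0 ∧ x < s.t11 ∧ s.t22 = -1 then { s with t22 := x }
  else if x > t0 ∧ x > s.t11 ∧ s.t23 = -1 then { s with t23 := x }
  else if x < t0 ∧ x < s.t10 ∧ x < s.t20 ∧ s.t30 = -1 then { s with t30 := x }
  else if x < t0 ∧ x < s.t10 ∧ x > s.t20 ∧ s.t31 = -1 then { s with t31 := x }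
  else if x < t0 ∧ x > s.t10 ∧ x < s.t21 ∧ s.t32 = -1 then { s with t32 := x }
  else if x < t0 ∧ x > s.t10 ∧ x > s.t21 ∧ s.t33 = -1 then { s with t33 := x }
  else if x > t0 ∧ x < s.t11 ∧ x < s.t22 ∧ s.t34 = -1 then { s with t34 := x }
  else if x > t0 ∧ x < s.t11 ∧ x > s.t22 ∧ s.t35 = -1 then { s with t35 := x }
  else if x > t0 ∧ x > s.t11 ∧ x < s.t23 ∧ s.t36 = -1 then { s with t36 := x }
  else if x > t0 ∧ x > s.t11 ∧ x > s.t23 ∧ s.t37 = -1 then { s with t37 := x }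
  else s

-- `while -1 in ans: ans.remove(-1)` deletes every -1, i.e. keeps exactly the non-(-1) entries
def findans (a : List Int) : List Int :=
  match a with
  | [] => []   -- Python raises IndexError reading the first element; excluded by Pre_findans
  | a0 :: rest =>
    let s0 : StA := ⟨-1, -1, -1, -1, -1, -1, -1, -1, -1, -1, -1, -1, -1, -1⟩
    let s := rest.foldl (stepA a0) s0
    let ans := [s.t30, s.t31, s.t20, s.t32, s.t33, s.t21, s.t10,
                s.t34, s.t35, s.t22, s.t36, s.t37, s.t23, s.t11, a0]
    ans.filter (fun v => v ≠ -1)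

-- ===== PORT B =====
-- Source B's recursive `place`; the Python recursion descends at most 4 levels (idx < 15),
-- the fuel argument only witnesses that termination (4 at the root).
def placeB (x : Int) : Nat → Nat → List Int → List Int
  | 0, _, tree => tree
  | fuel + 1, idx, tree =>
    if idx ≥ 15 then tree
    else if idx ≠ 0 ∧ tree.getD idx 0 = -1 then tree.set idx x
    else if x < tree.getD idx 0 then placeB x fuel (2 * idx + 1) tree
    else if x > tree.getD idx 0 then placeB x fuel (2 * idx + 2) tree
    else tree

-- Source B's recursive `post`; fuel 4 covers all indices < 15
def postB (tree : List Int) : Nat → Nat → List Int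
  | 0, _ => []
  | fuel + 1, i =>
    if i ≥ 15 then []
    else postB tree fuel (2 * i + 1) ++ postB tree fuel (2 * i + 2) ++ [tree.getD i 0]

def findans_alt (a : List Int) : List Int :=
  match a with
  | [] => []   -- Python raises IndexError reading the first element; excluded by Pre_findans
  | a0 :: rest =>
    let tree0 := (List.replicate 15 (-1 : Int)).set 0 a0
    let tree := rest.foldl (fun t x => placeB x 4 0 t) tree0
    (postB tree 4 0).filter (fun v => v ≠ -1)

-- ===== PRECONDITION & SPEC =====
-- Pre_ excludes only the empty list, on which Python A (and B) raise IndexError reading the first element.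
def Pre_findans (a : List Int) : Prop := a ≠ []
instance (a : List Int) : Decidable (Pre_findans a) := by unfold Pre_findans; infer_instance
def pvWitness_findans : List Int := [5, 3, 8, -1, 4]

def Spec_findans (a : List Int) (out : List Int) : Prop := out = findans_alt a
instance (a : List Int) (out : List Int) : Decidable (Spec_findans a out) := by unfold Spec_findans; infer_instance

-- ===== CLAIM (what is proved, stated in full; the proofs are below) =====
def Claim_equal_findans : Prop := ∀ (a : List Int), Dom_findans a → Pre_findans a → Spec_findans a (findans a)

-- ===== LEMMAS AND PROOFS =====

-- B's heap array, expressed from A's level-slot state (heap index order 0..14)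
def ofState (t0 : Int) (s : StA) : List Int :=
  [t0, s.t10, s.t11, s.t20, s.t21, s.t22, s.t23,
   s.t30, s.t31, s.t32, s.t33, s.t34, s.t35, s.t36, s.t37]

theorem step_eq (t0 : Int) (s : StA) (x : Int) :
    placeB x 4 0 (ofState t0 s) = ofState t0 (stepA t0 s x) := by
  obtain ⟨t10, t11, t20, t21, t22, t23, t30, t31, t32, t33, t34, t35, t36, t37⟩ := s
  rcases lt_trichotomy x t0 with h1 | h1 | h1
  · -- x < t0
    by_cases e1 : t10 = -1
    · simp [placeB, stepA, ofState, h1, e1]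
    · rcases lt_trichotomy x t10 with h2 | h2 | h2
      · 
        -- x < t10
        by_cases e2 : t20 = -1
        · simp [placeB, stepA, ofState, h1, show ¬ t0 < x by omega, e1, h2, e2]
        · rcases lt_trichotomy x t20 with h3 | h3 | h3
          · by_cases e3 : t30 = -1 <;>
            simp [placeB, stepA, ofState, h1, show ¬ t0 < x by omega, e1, h2, show ¬ t10 < x by omega, e2, e3, h3, show ¬ t20 < x by omega]
          · simp [placeB, stepA, ofState, h1, show ¬ t0 < x by omega, e1, h2, show ¬ t10 < x by omega, e2, show ¬ x < t20 by omega, show ¬ t20 < x by omega]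
          · by_cases e3 : t31 = -1 <;>
            simp [placeB, stepA, ofState, h1, show ¬ t0 < x by omega, e1, h2, show ¬ t10 < x by omega, e2, e3, h3, show ¬ x < t20 by omega]
      · simp [placeB, stepA, ofState, h1, show ¬ t0 < x by omega, e1, show ¬ x < t10 by omega, show ¬ t10 < x by omega]
      · 
        -- x > t10
        by_cases e2 : t21 = -1
        · simp [placeB, stepA, ofState, h1, show ¬ t0 < x by omega, e1, h2, show ¬ x < t10 by omega, e2]
        · rcases lt_trichotomy x t21 with h3 | h3 | h3
          · by_cases e3 : t32 = -1 <;>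
            simp [placeB, stepA, ofState, h1, show ¬ t0 < x by omega, e1, h2, show ¬ x < t10 by omega, e2, e3, h3, show ¬ t21 < x by omega]
          · simp [placeB, stepA, ofState, h1, show ¬ t0 < x by omega, e1, h2, show ¬ x < t10 by omega, e2, show ¬ x < t21 by omega, show ¬ t21 < x by omega]
          · by_cases e3 : t33 = -1 <;>
            simp [placeB, stepA, ofState, h1, show ¬ t0 < x by omega, e1, h2, show ¬ x < t10 by omega, e2, e3, h3, show ¬ x < t21 by omega]
  · simp [placeB, stepA, ofState, show ¬ x < t0 by omega, show ¬ t0 < x by omega]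
  · -- x > t0
    by_cases e1 : t11 = -1
    · simp [placeB, stepA, ofState, h1, show ¬ x < t0 by omega, e1]
    · rcases lt_trichotomy x t11 with h2 | h2 | h2
      · 
        -- x < t11
        by_cases e2 : t22 = -1
        · simp [placeB, stepA, ofState, h1, show ¬ x < t0 by omega, e1, h2, e2]
        · rcases lt_trichotomy x t22 with h3 | h3 | h3
          · by_cases e3 : t34 = -1 <;>
            simp [placeB, stepA, ofState, h1, show ¬ x < t0 by omega, e1, h2, show ¬ t11 < x by omega, e2, e3, h3, show ¬ t22 < x by omega]
          · simp [placeB, stepA, ofState, h1, show ¬ x < t0 by omega, e1, h2, show ¬ t11 < x by omega, e2, show ¬ x < t22 by omega, show ¬ t22 < x by omega]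
          · by_cases e3 : t35 = -1 <;>
            simp [placeB, stepA, ofState, h1, show ¬ x < t0 by omega, e1, h2, show ¬ t11 < x by omega, e2, e3, h3, show ¬ x < t22 by omega]
      · simp [placeB, stepA, ofState, h1, show ¬ x < t0 by omega, e1, show ¬ x < t11 by omega, show ¬ t11 < x by omega]
      · 
        -- x > t11
        by_cases e2 : t23 = -1
        · simp [placeB, stepA, ofState, h1, show ¬ x < t0 by omega, e1, h2, show ¬ x < t11 by omega, e2]
        · rcases lt_trichotomy x t23 with h3 | h3 | h3
          · by_cases e3 : t36 = -1 <;>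
            simp [placeB, stepA, ofState, h1, show ¬ x < t0 by omega, e1, h2, show ¬ x < t11 by omega, e2, e3, h3, show ¬ t23 < x by omega]
          · simp [placeB, stepA, ofState, h1, show ¬ x < t0 by omega, e1, h2, show ¬ x < t11 by omega, e2, show ¬ x < t23 by omega, show ¬ t23 < x by omega]
          · by_cases e3 : t37 = -1 <;>
            simp [placeB, stepA, ofState, h1, show ¬ x < t0 by omega, e1, h2, show ¬ x < t11 by omega, e2, e3, h3, show ¬ x < t23 by omega]

theorem fold_eq (t0 : Int) (l : List Int) (s : StA) :
    l.foldl (fun t x => placeB x 4 0 t) (ofState t0 s) = ofState t0 (l.foldl (stepA t0) s) := by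
  induction l generalizing s with
  | nil => rfl
  | cons y ys ih => simp only [List.foldl, step_eq]; exact ih _

theorem post_eq (t0 : Int) (s : StA) :
    postB (ofState t0 s) 4 0 =
      [s.t30, s.t31, s.t20, s.t32, s.t33, s.t21, s.t10,
       s.t34, s.t35, s.t22, s.t36, s.t37, s.t23, s.t11, t0] := by
  rfl

-- ===== VERDICT (by name: the statement is the Claim_ definition above) =====
theorem findans_spec : Claim_equal_findans := by
  intro a _ hpre
  unfold Spec_findans findans findans_alt
  match a with
  | [] => exact absurd rfl hpre
  | a0 :: rest =>
    have h0 : (List.replicate 15 (-1 : Int)).set 0 a0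
        = ofState a0 ⟨-1, -1, -1, -1, -1, -1, -1, -1, -1, -1, -1, -1, -1, -1⟩ := rfl
    simp only [h0, fold_eq, post_eq]
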